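-- pv_equiv track=rewrite | github.com/NishantKumar1301/Dsa-Pratice-Questions | Leetcode/Contest/Weekly Contest 449/ques1.py | minDeletion
-- ===== SOURCE A (Python) =====
-- from collections import Counter
--
-- def minDeletion(s, k):
--     """
--     :type s: str
--     :type k: int
--     :rtype: int
--     """
--     # s= set(s)
--     # return len(s)-k
--     freq = Counter(s)
--     freq = sorted(freq.values())
--     ans = 0
--     n = len(freq) - k
--     for i in range(n):
--         ans += freq[i]
--     return ans
-- ===== SOURCE B (Python) =====
-- from collections import Counter
--
-- def minDeletion(s, k):
--     # Greedy: repeatedly delete all occurrences of a least-frequent remaining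
--     # character until at most k distinct characters remain. No sorting.
--     freq = list(Counter(s).values())
--     ans = 0
--     while len(freq) > k:
--         m = min(freq)
--         freq.remove(m)
--         ans += m
--     return ans
-- ===== Notes on version B (the rewrite author's own statement) =====
-- stated objective: alternative
-- what changed: B replaces A's sort-then-prefix-sum with a greedy loop that repeatedly extracts (min + remove) a least-frequent character from the unsorted frequency multiset until at most k distinct remain, accumulating the deletions.
import Mathlib
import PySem

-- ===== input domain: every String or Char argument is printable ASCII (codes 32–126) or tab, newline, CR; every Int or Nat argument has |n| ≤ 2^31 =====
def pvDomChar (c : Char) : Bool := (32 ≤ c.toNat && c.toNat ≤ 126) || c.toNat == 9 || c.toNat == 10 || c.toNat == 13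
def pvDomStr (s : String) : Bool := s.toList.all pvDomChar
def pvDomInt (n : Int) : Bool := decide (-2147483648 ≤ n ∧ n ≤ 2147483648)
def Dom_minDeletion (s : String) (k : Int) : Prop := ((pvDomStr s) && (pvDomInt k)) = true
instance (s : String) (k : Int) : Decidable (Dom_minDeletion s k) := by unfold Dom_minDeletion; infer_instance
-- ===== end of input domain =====

-- B replaces A's sort-then-prefix-sum with a greedy loop that repeatedly extracts
-- (min + remove) a least-frequent character from the UNSORTED frequency multiset
-- until at most k distinct remain (alternative decomposition, not claimed faster).

-- ===== PORT A =====
-- freq = Counter(s); freq = sorted(freq.values()); ans = 0; n = len(freq) - k;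
-- for i in range(n): ans += freq[i]; return ans
-- (freq[i] is in range whenever A returns, i.e. for k ≥ 0; pyGetD's default is unreachable there)
def minDeletion (s : String) (k : Int) : Int :=
  let freq := PySem.Dict.counter s.toList
  let fvals := PySem.List.sorted freq.values (fun x => x) false
  let n : Int := (fvals.length : Int) - k
  (PySem.List.pyRange 0 n 1).foldl (fun ans i => ans + PySem.List.pyGetD fvals i 0) 0

-- ===== PORT B =====
-- while len(freq) > k: m = min(freq); freq.remove(m); ans += m
-- (min? / remove? return none exactly where Python raises ValueError — only reachable for k < 0, outside Pre_)
def minDeletionLoop (freq : List Int) (k : Int) (ans : Int) : Int :=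
  if h : k < (freq.length : Int) then
    match hm : PySem.List.min? freq (fun x => x) with
    | none => ans
    | some m =>
      match hr : PySem.List.remove? freq m with
      | none => ans
      | some rest => minDeletionLoop rest k (ans + m)
  else ans
termination_by freq.length
decreasing_by
  have hmem : m ∈ freq := PySem.List.min?_mem hm
  have he := PySem.List.remove?_eq_some_erase freq m hmem
  rw [he] at hr
  cases hr
  have h1 := List.length_erase_of_mem hmem
  have h2 : freq.length ≠ 0 := by
    intro h0; exact absurd hmem (by simp [List.eq_nil_of_length_eq_zero h0])
  omega

-- freq = list(Counter(s).values()); ans = 0; <loop>; return ans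
def minDeletion_alt (s : String) (k : Int) : Int :=
  minDeletionLoop (PySem.Dict.counter s.toList).values k 0

-- ===== PRECONDITION & SPEC =====
-- A raises IndexError for k < 0 (its range over-indexes the sorted frequency list); excluded.
def Pre_minDeletion (s : String) (k : Int) : Prop := 0 ≤ k
instance (s : String) (k : Int) : Decidable (Pre_minDeletion s k) := by unfold Pre_minDeletion; infer_instance
def pvWitness_minDeletion : String × Int := ("aab", 1)

def Spec_minDeletion (s : String) (k : Int) (out : Int) : Prop := out = minDeletion_alt s k
instance (s : String) (k : Int) (out : Int) : Decidable (Spec_minDeletion s k out) := by unfold Spec_minDeletion; infer_instance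

-- ===== CLAIM (what is proved, stated in full; the proofs are below) =====
def Claim_equal_minDeletion : Prop := ∀ (s : String) (k : Int), Dom_minDeletion s k → Pre_minDeletion s k → Spec_minDeletion s k (minDeletion s k)

-- ===== LEMMAS AND PROOFS =====

-- A's indexing loop over range(m) sums the first m elements (Nat bound)
theorem pv_loopA_nat (xs : List Int) (m : Nat) (hm : m ≤ xs.length) :
    (PySem.List.pyRange 0 (m : Int) 1).foldl (fun ans i => ans + PySem.List.pyGetD xs i 0) 0
      = (xs.take m).sum := by
  induction m with
  | zero => simp [PySem.List.pyRange_one_eq_nil]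
  | succ m ih =>
    have hcast : ((m + 1 : Nat) : Int) = (m : Int) + 1 := by push_cast; ring
    rw [hcast, PySem.List.pyRange_one_succ_right (a := 0) (b := (m : Int)) (by omega),
        List.foldl_append]
    have hm' : m < xs.length := by omega
    rw [ih (by omega)]
    simp only [List.foldl_cons, List.foldl_nil, PySem.List.pyGetD_natCast,
      List.getD_eq_getElem xs 0 hm']
    rw [List.take_add_one, List.sum_append]
    simp [List.getElem?_eq_getElem hm']

-- range over an Int bound is range over its toNat
theorem pv_pyRange_toNat (n : Int) :
    PySem.List.pyRange 0 n 1 = PySem.List.pyRange 0 (n.toNat : Int) 1 := by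
  by_cases h : n ≤ 0
  · rw [PySem.List.pyRange_one_eq_nil h, PySem.List.pyRange_one_eq_nil (by omega)]
  · rw [Int.toNat_of_nonneg (by omega)]

-- extracting the minimum splits the sorted list: sorted freq = m :: sorted (freq.erase m)
theorem pv_sorted_extract_min (freq : List Int) (m : Int)
    (hm : PySem.List.min? freq (fun x => x) = some m) :
    PySem.List.sorted freq (fun x => x) false
      = m :: PySem.List.sorted (freq.erase m) (fun x => x) false := by
  have hmem : m ∈ freq := PySem.List.min?_mem hm
  have hmin := PySem.List.min?_isMin hm
  have hperm : (PySem.List.sorted freq (fun x => x) false).Perm freq :=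
    PySem.List.sorted_perm freq (fun x => x) false
  have hpw : (PySem.List.sorted freq (fun x => x) false).Pairwise (· ≤ ·) :=
    PySem.List.sorted_pairwise freq (fun x => x)
  obtain ⟨h, t, hht⟩ : ∃ h t, PySem.List.sorted freq (fun x => x) false = h :: t := by
    cases hs : PySem.List.sorted freq (fun x => x) false with
    | nil =>
      exfalso
      have : freq = [] := (PySem.List.sorted_eq_nil_iff _ _ _).mp hs
      simp [this] at hmem
    | cons h t => exact ⟨h, t, rfl⟩
  have hhm : h = m := by
    have h1 : m ≤ h := hmin h (hperm.mem_iff.mp (by simp [hht]))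
    have h2 : h ≤ m := by
      have : m ∈ h :: t := by rw [← hht]; exact hperm.mem_iff.mpr hmem
      rcases List.mem_cons.mp this with he | ht'
      · omega
      · exact (List.pairwise_cons.mp (hht ▸ hpw)).1 m ht'
    omega
  rw [hht, hhm]
  congr 1
  -- t and sorted (freq.erase m) are sorted permutations of the same multiset
  have het : (freq.erase m).Perm t := by
    have hp := hperm.erase m
    rw [hht, hhm, List.erase_cons_head] at hp
    exact hp.symm
  apply Eq.symm
  exact PySem.List.eq_of_perm_of_pairwise_le_of_injective (fun x => x)
    (fun _ _ h => h)
    ((PySem.List.sorted_perm _ _ _).trans het)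
    (PySem.List.sorted_pairwise _ _)
    ((List.pairwise_cons.mp (hht ▸ hpw)).2)

-- B's extract-min loop sums the (len − k) smallest frequencies
theorem pv_loopB_eq (n : Nat) : ∀ (freq : List Int), freq.length = n → ∀ (k ans : Int), 0 ≤ k →
    minDeletionLoop freq k ans
      = ans + ((PySem.List.sorted freq (fun x => x) false).take (freq.length - k.toNat)).sum := by
  induction n with
  | zero =>
    intro freq hlen k ans hk
    have : freq = [] := List.eq_nil_of_length_eq_zero hlen
    subst this
    rw [minDeletionLoop.eq_def, dif_neg (by simp; omega : ¬ k < (([] : List Int).length : Int))]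
    simp
  | succ n ih =>
    intro freq hlen k ans hk
    rw [minDeletionLoop.eq_def]
    by_cases h : k < (freq.length : Int)
    · rw [dif_pos h]
      split
      · -- min? = none: impossible, freq is nonempty
        next hmE =>
        exfalso
        have := (PySem.List.min?_eq_none_iff freq (fun x => x)).mp hmE
        simp [this] at hlen
      · next m hmE =>
        have hmem : m ∈ freq := PySem.List.min?_mem hmE
        have hrE : PySem.List.remove? freq m = some (freq.erase m) :=
          PySem.List.remove?_eq_some_erase freq m hmem
        split
        · next hr => rw [hrE] at hr; cases hr
        · next rest hr =>
          rw [hrE] at hr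
          cases hr
          have hlen' : (freq.erase m).length = n := by
            have := List.length_erase_of_mem hmem; omega
          rw [ih (freq.erase m) hlen' k (ans + m) hk, pv_sorted_extract_min freq m hmE]
          have hkn : k.toNat ≤ n := by omega
          have h1 : freq.length - k.toNat = (n - k.toNat) + 1 := by omega
          rw [h1, hlen', List.take_succ_cons, List.sum_cons]
          ring
    · rw [dif_neg h]
      have : freq.length - k.toNat = 0 := by omega
      simp [this]

-- ===== VERDICT (by name: the statement is the Claim_ definition above) =====
theorem minDeletion_spec : Claim_equal_minDeletion := by
  intro s k _ hk
  have hk0 : (0 : Int) ≤ k := hk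
  unfold Spec_minDeletion minDeletion minDeletion_alt
  simp only []
  generalize hC : (PySem.Dict.counter s.toList).values = c
  have hlen : (PySem.List.sorted c (fun x => x) false).length = c.length :=
    PySem.List.length_sorted c (fun x => x) false
  rw [pv_pyRange_toNat, pv_loopA_nat _ _ (by omega), pv_loopB_eq c.length c rfl k 0 hk0]
  have : (((PySem.List.sorted c (fun x => x) false).length : Int) - k).toNat
      = c.length - k.toNat := by omega
  rw [this, zero_add]
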